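-- pv_equiv track=rewrite | github.com/Emulisy/Monash-School-Work | Y1S1/FIT1045/FIT1045-A3-main/task5 final.py | encrypt_decrypt
-- ===== SOURCE A (Python) =====
-- def encrypt_decrypt(given_string,password:str,encrypt:bool) -> list:
--     """
--     This function will encrypted and decrypted text according to given boolean signal using given string and password
--     param:
--     given_string: String that we are going to encrypt or decrypt
--     password: String that is use for the encrypting or decrypting of the string
--     encrypt: signal whether to encrypt or decrypt text
--     """
--     encrypted_string= [ord(symbol) for letter in given_string for symbol in letter] # encrypting string given
--     encrypted_password=[ord(letter) for letter in password] #encrypting password given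
--     new_encrypted_password=list(map(lambda encrypted_number:int((encrypted_number + 1) / 2)if encrypted_number%2!=0 else encrypted_number//2 ,encrypted_password)) #key password of each index /2
--     encrypted_password=new_encrypted_password.copy() #copy from new_encrypted_password to encrypted_password so new_encrypted_password can be use later
--     direction = 1  #indicate which direction to append
--
--
--     while len(encrypted_password)<len(encrypted_string): #loop for repeating key but backward if length of string is longer than key
--         for encrypted_password_index in range((len(new_encrypted_password))):
--             if len(encrypted_password)<len(encrypted_string):
--                 if direction==1: #append from the back
--                     encrypted_password.append(new_encrypted_password[-(encrypted_password_index+1)]) #add from the back of the new encryption password list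
--                 else:
--                     encrypted_password.append(new_encrypted_password[encrypted_password_index]) # add from the front of the new encryption password list
--         direction*=-1 #change direction when one iteration is done
--
--     if encrypt==True:
--         encrypted_text =[]
--         for encrypted_string_index in range(len(encrypted_string)):#get encrypted text by adding key and word
--             sum_of_encrypted_password_string=encrypted_password[encrypted_string_index]+encrypted_string[encrypted_string_index] #sum up the key and word on each index
--             encrypted_text.append(sum_of_encrypted_password_string) # add into list
--
--
--         for number in range(len(encrypted_text)): # to convert encrypted text for output
--             encrypted_text[number]=chr(encrypted_text[number])
--
--         return encrypted_text
--
--     #DECRYPTED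
--     elif encrypt==False: # to decrypted text
--         decrypted_text=[]
--         for symbol in range(len(encrypted_string)):#work backward and minus encrypted text with encrypted password
--             sum_of_decrypted_password_string=encrypted_string[symbol]-encrypted_password[symbol]
--             if sum_of_decrypted_password_string<0:
--                 sum_of_decrypted_password_string*=-1
--             decrypted_text.append(sum_of_decrypted_password_string)
--
--         for number in range(len(decrypted_text)): #convert into actual text
--             decrypted_text[number]=chr(decrypted_text[number])
--         return decrypted_text
-- ===== SOURCE B (Python) =====
-- def encrypt_decrypt(given_string, password: str, encrypt: bool) -> list:
--     """Same cipher, but the repeated zigzag key is computed per index instead of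
--     being materialised by the while/append loop: block i//L goes forward when even,
--     backward when odd."""
--     codes = [ord(c) for c in given_string]
--     if not codes:
--         return []
--     folded = [(o + 1) // 2 if o % 2 else o // 2 for o in (ord(c) for c in password)]
--     L = len(folded)
--     result = []
--     for i, c in enumerate(codes):
--         b, p = divmod(i, L)
--         k = folded[p] if b % 2 == 0 else folded[L - 1 - p]
--         result.append(chr(k + c) if encrypt else chr(abs(c - k)))
--     return result
-- ===== Notes on version B (the rewrite author's own statement) =====
-- stated objective: simpler
-- what changed: Replaces the direction-flipping while/for loop that materialises the full repeated key (and the two separate chr-conversion passes) by a single pass that computes each key element on the fly from i//L and i%L; Pre_ excludes an empty password with a non-empty string, on which A loops forever (and B raises ZeroDivisionError).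
import Mathlib
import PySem

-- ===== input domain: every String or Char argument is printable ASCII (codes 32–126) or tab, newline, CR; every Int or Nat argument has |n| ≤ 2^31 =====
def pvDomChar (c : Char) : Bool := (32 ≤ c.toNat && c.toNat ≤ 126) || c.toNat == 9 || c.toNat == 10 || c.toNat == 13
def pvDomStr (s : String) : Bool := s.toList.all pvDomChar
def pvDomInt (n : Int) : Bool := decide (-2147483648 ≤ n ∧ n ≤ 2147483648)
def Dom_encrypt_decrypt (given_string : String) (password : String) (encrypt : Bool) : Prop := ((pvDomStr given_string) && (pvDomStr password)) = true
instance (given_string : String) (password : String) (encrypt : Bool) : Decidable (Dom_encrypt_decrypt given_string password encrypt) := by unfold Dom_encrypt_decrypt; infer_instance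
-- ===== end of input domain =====

-- B computes the zigzag key per index (block i//L forward when even, backward when odd) in one
-- pass, instead of A's direction-flipping while/for loop materialising the key plus two chr passes.

-- chr(n): exact for 0 ≤ n < 0x110000 (all values arising here are < 256)
def pyChr (n : Int) : String := String.ofList [Char.ofNat n.toNat]

-- ===== PORT A =====
-- A's while loop; the fuel argument (n+1 at the call site) only makes the recursion total:
-- on inputs in Pre_ the key list is non-empty, each pass appends at least one element, and
-- the fuel is never exhausted
def edWhile (newPass : List Int) (n : Nat) (fuel : Nat) (dir : Int) (key : List Int) : List Int :=
  match fuel with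
  | 0 => key
  | fuel + 1 =>
    if key.length < n then
      let key' := (List.range newPass.length).foldl (fun k (i : Nat) =>
        if k.length < n then
          k ++ [if dir = 1 then PySem.List.pyGetD newPass (-((i : Int) + 1)) 0
                else PySem.List.pyGetD newPass (i : Int) 0]   -- indices provably in range: pyGetD is Python's (raising) indexing here
        else k) key
      edWhile newPass n fuel (dir * -1) key'
    else key

def encrypt_decrypt (given_string : String) (password : String) (encrypt : Bool) : List String :=
  -- [ord(symbol) for letter in given_string for symbol in letter]: each letter of a str is a
  -- 1-char str and iterating it yields itself, so this is ord of each character in order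
  let encryptedString : List Int := given_string.toList.map (fun c => (c.toNat : Int))
  let encryptedPassword : List Int := password.toList.map (fun c => (c.toNat : Int))
  -- int((n+1)/2) is exact float arithmetic on these values: truncdiv is its PySem port
  let newEncryptedPassword : List Int := encryptedPassword.map (fun n =>
    if PySem.Int.mod n 2 ≠ 0 then PySem.Int.truncdiv (n + 1) 2 else PySem.Int.floordiv n 2)
  let n := encryptedString.length
  let key := edWhile newEncryptedPassword n (n + 1) 1 newEncryptedPassword
  if encrypt then
    let encryptedText : List Int := (List.range n).foldl (fun acc (i : Nat) =>
      acc ++ [PySem.List.pyGetD key (i : Int) 0 + PySem.List.pyGetD encryptedString (i : Int) 0]) []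
    encryptedText.map pyChr   -- the in-place chr conversion loop
  else
    let decryptedText : List Int := (List.range n).foldl (fun acc (i : Nat) =>
      acc ++ [(fun d => if d < 0 then d * (-1) else d)
        (PySem.List.pyGetD encryptedString (i : Int) 0 - PySem.List.pyGetD key (i : Int) 0)]) []
    decryptedText.map pyChr

-- ===== PORT B =====
def encrypt_decrypt_alt (given_string : String) (password : String) (encrypt : Bool) : List String :=
  let codes : List Int := given_string.toList.map (fun c => (c.toNat : Int))
  if codes = [] then []
  else
    let folded : List Int := password.toList.map (fun c =>
      let o : Int := (c.toNat : Int)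
      if PySem.Int.mod o 2 ≠ 0 then PySem.Int.floordiv (o + 1) 2 else PySem.Int.floordiv o 2)
    let L := folded.length
    (PySem.List.enumerate codes 0).map (fun ic =>
      let i := ic.1
      let c := ic.2
      let b := PySem.Int.floordiv i (L : Int)   -- divmod(i, L); L = 0 raises in Python, excluded by Pre_
      let p := PySem.Int.mod i (L : Int)
      let k := if PySem.Int.mod b 2 = 0 then PySem.List.pyGetD folded p 0
               else PySem.List.pyGetD folded ((L : Int) - 1 - p) 0
      if encrypt then pyChr (k + c) else pyChr (|c - k|))

-- ===== PRECONDITION & SPEC =====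
-- Pre_ excludes an empty password together with a non-empty given_string: there A's
-- while loop never terminates (and B raises ZeroDivisionError).
def Pre_encrypt_decrypt (given_string : String) (password : String) (encrypt : Bool) : Prop :=
  password.toList ≠ [] ∨ given_string.toList = []
instance (given_string : String) (password : String) (encrypt : Bool) : Decidable (Pre_encrypt_decrypt given_string password encrypt) := by unfold Pre_encrypt_decrypt; infer_instance

def pvWitness_encrypt_decrypt : String × String × Bool := ("hello", "key", true)

def Spec_encrypt_decrypt (given_string : String) (password : String) (encrypt : Bool) (out : List String) : Prop := out = encrypt_decrypt_alt given_string password encrypt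
instance (given_string : String) (password : String) (encrypt : Bool) (out : List String) : Decidable (Spec_encrypt_decrypt given_string password encrypt out) := by unfold Spec_encrypt_decrypt; infer_instance

-- ===== CLAIM (what is proved, stated in full; the proofs are below) =====
def Claim_equal_encrypt_decrypt : Prop := ∀ (given_string : String) (password : String) (encrypt : Bool), Dom_encrypt_decrypt given_string password encrypt → Pre_encrypt_decrypt given_string password encrypt → Spec_encrypt_decrypt given_string password encrypt (encrypt_decrypt given_string password encrypt)

-- ===== LEMMAS AND PROOFS =====

-- the i-th element of the infinite zigzag key stream over f
def keyFun (f : List Int) (i : Nat) : Int :=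
  if (i / f.length) % 2 = 0 then f.getD (i % f.length) 0 else f.getD (f.length - 1 - i % f.length) 0

def keyList (f : List Int) (m : Nat) : List Int := (List.range m).map (keyFun f)

theorem keyList_self (f : List Int) : keyList f f.length = f := by
  apply List.ext_getElem (by simp [keyList])
  intro i h1 h2
  simp only [keyList, List.getElem_map, List.getElem_range, keyFun]
  rw [Nat.div_eq_of_lt h2, Nat.mod_eq_of_lt h2]
  simp [List.getD_eq_getElem?_getD, List.getElem?_eq_getElem h2]

theorem map_range_fwd (f : List Int) :
    (List.range f.length).map (fun i : Nat => PySem.List.pyGetD f (i : Int) 0) = f := by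
  apply List.ext_getElem (by simp)
  intro i h1 h2
  simp [List.getElem?_eq_getElem h2]

theorem map_range_bwd (f : List Int) :
    (List.range f.length).map (fun i : Nat => PySem.List.pyGetD f (-((i : Int) + 1)) 0) = f.reverse := by
  apply List.ext_getElem (by simp)
  intro i h1 h2
  simp only [List.getElem_map, List.getElem_range, List.getElem_reverse]
  have h3 : (-((i : Int) + 1)) = -(((i + 1 : Nat) : Int)) := by push_cast; ring
  rw [h3, PySem.List.pyGetD_neg_natCast _ _ _ (by omega) (by simpa using h1)]
  congr 1; omega

-- one inner for-pass appends a truncated copy of (range L).map g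
theorem pass_eq (g : Nat → Int) (L n : Nat) (key : List Int) :
    (List.range L).foldl (fun k i => if k.length < n then k ++ [g i] else k) key
      = key ++ ((List.range L).map g).take (n - key.length) := by
  induction L generalizing key with
  | zero => simp
  | succ L ih =>
    rw [List.range_succ, List.foldl_append, List.map_append, ih]
    simp only [List.foldl_cons, List.foldl_nil, List.take_append]
    by_cases h1 : key.length < n
    · by_cases h2 : n - key.length ≤ L
      · have hlen : (key ++ (List.take (n - key.length) (List.map g (List.range L)))).length = n := by
          simp; omega
        rw [if_neg (by omega)]
        have : n - key.length - (List.map g (List.range L)).length = 0 := by simp; omega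
        rw [this]
        simp
      · have hlen : (key ++ (List.take (n - key.length) (List.map g (List.range L)))).length = key.length + L := by
          simp; omega
        rw [if_pos (by omega)]
        have e1 : List.take (n - key.length) (List.map g (List.range L)) = List.map g (List.range L) := by
          apply List.take_of_length_le; simp; omega
        have e2 : n - key.length - (List.map g (List.range L)).length = n - key.length - L := by simp
        rw [e1, e2]
        have : List.take (n - key.length - L) (List.map g [L]) = [g L] := by
          have : n - key.length - L ≥ 1 := by omega
          simp [List.take_of_length_le, this]
        rw [this]
        simp
    · have : n - key.length = 0 := by omega
      rw [this]
      simp [h1]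

-- extending a whole-blocks prefix of the key stream by a truncated next block
theorem keyList_block (f : List Int) (b k : Nat) (hf : f ≠ []) (hk : k ≤ f.length) :
    keyList f (f.length * b + k)
      = keyList f (f.length * b) ++ (if b % 2 = 0 then f else f.reverse).take k := by
  have hL : 0 < f.length := List.length_pos_iff.mpr hf
  apply List.ext_getElem
  · simp only [keyList, List.length_map, List.length_range, List.length_append, List.length_take]
    split
    · omega
    · simp only [List.length_reverse]; omega
  intro i h1 h2
  simp only [keyList, List.length_map, List.length_range] at h1
  by_cases hi : i < f.length * b
  · rw [List.getElem_append_left (by simp [keyList]; omega)]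
    simp [keyList]
  · have hgeb : f.length * b ≤ i := by omega
    have hp : i - f.length * b < k := by omega
    rw [List.getElem_append_right (by simp [keyList]; omega)]
    simp only [keyList, List.length_map, List.length_range, List.getElem_map, List.getElem_range,
      List.getElem_take]
    set p := i - f.length * b with hpdef
    have hip : i = f.length * b + p := by omega
    have hdiv : i / f.length = b := by
      rw [hip, Nat.mul_add_div hL]
      have : p / f.length = 0 := Nat.div_eq_of_lt (by omega)
      omega
    have hmod : i % f.length = p := by
      rw [hip, Nat.mul_add_mod]
      exact Nat.mod_eq_of_lt (by omega)
    rw [keyFun, hdiv, hmod]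
    by_cases hb : b % 2 = 0
    · simp only [if_pos hb]
      rw [List.getD_eq_getElem?_getD, List.getElem?_eq_getElem (show p < f.length by omega)]
      simp only [Option.getD_some]
      congr 1
    · simp only [if_neg hb]
      rw [List.getElem_reverse]
      rw [List.getD_eq_getElem?_getD, List.getElem?_eq_getElem (show f.length - 1 - p < f.length by omega)]
      simp only [Option.getD_some]
      congr 1

theorem edWhile_stop (f key : List Int) (n : Nat) (fuel : Nat) (d : Int) (h : ¬ key.length < n) :
    edWhile f n fuel d key = key := by
  cases fuel <;> simp [edWhile, h]

theorem edWhile_spec (fuel : Nat) : ∀ (f key : List Int) (n b : Nat), f ≠ [] →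
    key = keyList f (f.length * b) → n ≤ f.length * b + fuel →
    edWhile f n fuel (if b % 2 = 1 then 1 else -1) key = keyList f (max (f.length * b) n) := by
  induction fuel with
  | zero =>
    intro f key n b hf hkey hn
    rw [edWhile, hkey]
    congr 1
    omega
  | succ fuel ih =>
    intro f key n b hf hkey hn
    have hL : 0 < f.length := List.length_pos_iff.mpr hf
    have hkl : key.length = f.length * b := by rw [hkey]; simp [keyList]
    have hmul : f.length * (b + 1) = f.length * b + f.length := Nat.mul_succ _ _
    rw [edWhile]
    by_cases hlt : key.length < n
    · rw [if_pos hlt]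
      have hblock :
          (List.range f.length).foldl (fun k (i : Nat) =>
            if k.length < n then
              k ++ [if (if b % 2 = 1 then (1:Int) else -1) = 1 then PySem.List.pyGetD f (-((i : Int) + 1)) 0
                    else PySem.List.pyGetD f (i : Int) 0]
            else k) key
          = key ++ (if b % 2 = 0 then f else f.reverse).take (n - key.length) := by
        rcases Nat.mod_two_eq_zero_or_one b with hb | hb
        · have hd : (if b % 2 = 1 then (1:Int) else -1) = -1 := by simp [hb]
          rw [hd]
          rw [pass_eq]
          simp only [if_neg (show ¬((-1 : Int) = 1) by norm_num), if_pos hb]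
          rw [map_range_fwd]
        · have hd : (if b % 2 = 1 then (1:Int) else -1) = 1 := by simp [hb]
          rw [hd]
          rw [pass_eq]
          simp only [if_true, if_neg (show ¬b % 2 = 0 by omega)]
          rw [map_range_bwd]
      rw [hblock]
      by_cases h2 : n ≤ f.length * (b + 1)
      · have ht : n - key.length ≤ f.length := by omega
        have hkey' : key ++ (if b % 2 = 0 then f else f.reverse).take (n - key.length)
            = keyList f n := by
          have hkb := keyList_block f b (n - key.length) hf ht
          rw [← hkey] at hkb
          rw [← hkb]
          congr 1
          omega
        rw [hkey', edWhile_stop]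
        · congr 1; omega
        · simp [keyList]
      · have htake : (if b % 2 = 0 then f else f.reverse).take (n - key.length)
            = (if b % 2 = 0 then f else f.reverse) := by
          apply List.take_of_length_le
          split
          · omega
          · simp only [List.length_reverse]; omega
        have hkey' : key ++ (if b % 2 = 0 then f else f.reverse).take (n - key.length)
            = keyList f (f.length * (b + 1)) := by
          rw [htake]
          have hkb := keyList_block f b f.length hf (le_refl _)
          have hlen2 : (if b % 2 = 0 then f else f.reverse).length ≤ f.length := by
            split
            · exact le_refl _
            · simp only [List.length_reverse]; exact le_refl _
          rw [List.take_of_length_le hlen2] at hkb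
          rw [← hkey] at hkb
          rw [← hkb]
          congr 1
        rw [hkey']
        have hd : (if b % 2 = 1 then (1:Int) else -1) * -1 = (if (b + 1) % 2 = 1 then 1 else -1) := by
          rcases Nat.mod_two_eq_zero_or_one b with hb | hb
          · have h1 : (b + 1) % 2 = 1 := by omega
            simp [hb, h1]
          · have h1 : (b + 1) % 2 = 0 := by omega
            simp [hb, h1]
        rw [hd, ih f _ n (b + 1) hf rfl (by omega)]
        congr 1
        omega
    · rw [if_neg hlt, hkey]
      congr 1
      omega

theorem enum_map (g : Int × Int → String) : ∀ (xs : List Int) (s : Int),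
    (PySem.List.enumerate xs s).map g
      = (List.range xs.length).map (fun i : Nat => g (s + (i : Int), xs.getD i 0)) := by
  intro xs
  induction xs with
  | nil => intro s; simp [PySem.List.enumerate_nil]
  | cons x xs ih =>
    intro s
    rw [PySem.List.enumerate_cons, List.map_cons, ih (s + 1), List.length_cons, List.range_succ_eq_map]
    simp only [List.map_cons, List.map_map]
    congr 1
    · norm_num
    · apply List.map_congr_left
      intro i _
      simp only [Function.comp_apply, List.getD_cons_succ]
      congr 2
      push_cast
      ring

theorem trunc_fold (a : Int) (h : 0 ≤ a) : PySem.Int.truncdiv a 2 = PySem.Int.floordiv a 2 := by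
  unfold PySem.Int.truncdiv PySem.Int.floordiv
  rw [Int.tdiv_eq_ediv_of_nonneg h, Int.fdiv_eq_ediv]
  simp

theorem ifneg_abs (d : Int) : (if d < 0 then d * (-1) else d) = |d| := by
  rcases lt_or_ge d 0 with h | h
  · rw [if_pos h, abs_of_neg h]; ring
  · rw [if_neg (not_lt.mpr h), abs_of_nonneg h]

theorem keyList_getD (f : List Int) (m i : Nat) (h : i < m) :
    PySem.List.pyGetD (keyList f m) (i : Int) 0 = keyFun f i := by
  rw [PySem.List.pyGetD_natCast]
  rw [List.getD_eq_getElem _ _ (by simp [keyList]; omega)]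
  simp [keyList]

theorem alt_key (f : List Int) (hf : f ≠ []) (i : Nat) :
    (if PySem.Int.mod (PySem.Int.floordiv (i : Int) (f.length : Int)) 2 = 0
       then PySem.List.pyGetD f (PySem.Int.mod (i : Int) (f.length : Int)) 0
       else PySem.List.pyGetD f ((f.length : Int) - 1 - PySem.Int.mod (i : Int) (f.length : Int)) 0)
    = keyFun f i := by
  have hL : 0 < f.length := List.length_pos_iff.mpr hf
  have hdiv : PySem.Int.floordiv (i : Int) (f.length : Int) = ((i / f.length : Nat) : Int) :=
    PySem.Int.floordiv_natCast i f.length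
  have hmod : PySem.Int.mod (i : Int) (f.length : Int) = ((i % f.length : Nat) : Int) :=
    PySem.Int.mod_natCast i f.length
  have hmod2 : PySem.Int.mod ((i / f.length : Nat) : Int) 2 = (((i / f.length) % 2 : Nat) : Int) := by
    exact_mod_cast PySem.Int.mod_natCast (i / f.length) 2
  rw [hdiv, hmod, hmod2, keyFun]
  by_cases hb : (i / f.length) % 2 = 0
  · rw [if_pos (by exact_mod_cast hb), if_pos hb, PySem.List.pyGetD_natCast]
  · rw [if_neg (by exact_mod_cast hb), if_neg hb]
    have hidx : (f.length : Int) - 1 - ((i % f.length : Nat) : Int)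
        = ((f.length - 1 - i % f.length : Nat) : Int) := by
      have := Nat.mod_lt i hL
      push_cast
      omega
    rw [hidx, PySem.List.pyGetD_natCast]

-- ===== VERDICT (by name: the statement is the Claim_ definition above) =====
theorem encrypt_decrypt_spec : Claim_equal_encrypt_decrypt := by
  intro gs pw e _ hPre
  unfold Spec_encrypt_decrypt encrypt_decrypt encrypt_decrypt_alt
  by_cases hnil : gs.toList.map (fun c => (c.toNat : Int)) = []
  · have hg : gs.toList = [] := by simpa using hnil
    simp [hg]
  · have hgs : gs.toList ≠ [] := by intro h; exact hnil (by simp [h])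
    have hpw : pw.toList ≠ [] := by
      rcases hPre with h | h
      · exact h
      · exact absurd h hgs
    have hfold :
        (pw.toList.map (fun c => (c.toNat : Int))).map (fun n =>
            if PySem.Int.mod n 2 ≠ 0 then PySem.Int.truncdiv (n + 1) 2 else PySem.Int.floordiv n 2)
          = pw.toList.map (fun c =>
              let o : Int := (c.toNat : Int)
              if PySem.Int.mod o 2 ≠ 0 then PySem.Int.floordiv (o + 1) 2 else PySem.Int.floordiv o 2) := by
      rw [List.map_map]
      apply List.map_congr_left
      intro c _
      simp only [Function.comp_apply]
      split
      · exact trunc_fold _ (by positivity)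
      · rfl
    simp only [hfold, if_neg hnil]
    set f := pw.toList.map (fun c =>
      let o : Int := (c.toNat : Int)
      if PySem.Int.mod o 2 ≠ 0 then PySem.Int.floordiv (o + 1) 2 else PySem.Int.floordiv o 2) with hfdef
    set codes := gs.toList.map (fun c => (c.toNat : Int)) with hcdef
    have hf : f ≠ [] := by
      rw [hfdef]
      simpa using hpw
    have hL : 0 < f.length := List.length_pos_iff.mpr hf
    set n := codes.length with hndef
    have hkey : edWhile f n (n + 1) 1 f = keyList f (max f.length n) := by
      have h1 := edWhile_spec (n + 1) f f n 1 hf (by rw [Nat.mul_one, keyList_self]) (by omega)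
      rw [show (if 1 % 2 = 1 then (1 : Int) else -1) = 1 by norm_num] at h1
      rw [h1, Nat.mul_one]
    simp only [hkey]
    rw [enum_map]
    cases e
    · simp only [Bool.false_eq_true, if_false]
      rw [PySem.List.foldl_append_singleton_eq_map, List.nil_append, List.map_map]
      apply List.map_congr_left
      intro i hi
      have hin : i < n := List.mem_range.mp hi
      simp only [Function.comp_apply, zero_add]
      rw [keyList_getD f _ i (by omega), alt_key f hf i, ifneg_abs, PySem.List.pyGetD_natCast]
    · simp only [if_true]
      rw [PySem.List.foldl_append_singleton_eq_map, List.nil_append, List.map_map]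
      apply List.map_congr_left
      intro i hi
      have hin : i < n := List.mem_range.mp hi
      simp only [Function.comp_apply, zero_add]
      rw [keyList_getD f _ i (by omega), alt_key f hf i, PySem.List.pyGetD_natCast]
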